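-- pv_equiv track=rewrite | github.com/ycm094/MG-FTE-main | models/data_loader.py | get_entity_label
-- ===== SOURCE A (Python) =====
-- def get_entity_label(max_len, index_head, index_tail, triple_tokenize):
--     # B-head, I-head, B-tail, I-tail, O, X: 1, 2, 3, 4, 0
--     entity_label = [0] * max_len
--     if index_head[0] < max_len:
--         entity_label[index_head[0]] = 1
--     for i in range(index_head[0]+1, index_head[1]):
--         if i < max_len:
--             entity_label[i] = 2
--     if index_tail[0] < max_len:
--         entity_label[index_tail[0]] = 3
--     for i in range(index_tail[0]+1, index_tail[1]):
--         if i < max_len: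
--             entity_label[i] = 4
--     return entity_label
-- ===== SOURCE B (Python) =====
-- def get_entity_label(max_len, index_head, index_tail, triple_tokenize):
--     # One contiguous classifying scan: tail span checked first so overlapping
--     # positions keep the tail label, matching A's write-head-then-tail order.
--     def label(i):
--         if i == index_tail[0]:
--             return 3
--         if index_tail[0] < i < index_tail[1]:
--             return 4
--         if i == index_head[0]:
--             return 1
--         if index_head[0] < i < index_head[1]:
--             return 2
--         return 0
--     return [label(i) for i in range(max_len)]
-- ===== Notes on version B (the rewrite author's own statement) =====
-- stated objective: simpler
-- what changed: Replaces A's four scattered range-fill writes into a preallocated list by a single classifying scan over range(max_len) that decides each position's label once (tail span tested before head).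
-- outside the precondition, e.g. on get_entity_label(5, (-2, -1), (0, 1), []): A returns [3, 0, 0, 1, 0], B returns [3, 0, 0, 0, 0]; on get_entity_label(0, (-1, 0), (0, 0), []): A raises IndexError, B returns []
import Mathlib
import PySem

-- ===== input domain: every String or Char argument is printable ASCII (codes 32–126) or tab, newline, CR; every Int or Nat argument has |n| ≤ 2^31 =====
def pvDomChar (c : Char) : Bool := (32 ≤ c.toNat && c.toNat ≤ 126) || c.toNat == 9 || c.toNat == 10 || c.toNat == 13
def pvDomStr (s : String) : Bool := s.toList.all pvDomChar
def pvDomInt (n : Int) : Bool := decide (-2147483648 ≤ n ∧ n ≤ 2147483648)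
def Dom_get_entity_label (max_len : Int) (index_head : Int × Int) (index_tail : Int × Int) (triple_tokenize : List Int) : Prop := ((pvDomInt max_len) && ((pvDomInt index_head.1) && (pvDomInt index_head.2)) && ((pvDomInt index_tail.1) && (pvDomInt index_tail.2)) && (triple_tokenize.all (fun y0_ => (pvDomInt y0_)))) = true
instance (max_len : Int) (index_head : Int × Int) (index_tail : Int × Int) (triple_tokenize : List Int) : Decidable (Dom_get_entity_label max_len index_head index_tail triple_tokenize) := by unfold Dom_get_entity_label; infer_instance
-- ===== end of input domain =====

-- B replaces A's four scattered range-fill writes by one classifying scan over range(max_len); objective: simpler.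

-- ===== PORT A =====
-- Python list assignment xs[i] = v: negative i wraps from the end; out of range raises
-- (the raising case is outside Pre_, where the helper leaves the list unchanged).
def pySetAt (xs : List Int) (i : Int) (v : Int) : List Int :=
  if 0 ≤ i then xs.set i.toNat v
  else if -(xs.length : Int) ≤ i then xs.set ((xs.length : Int) + i).toNat v
  else xs

def get_entity_label (max_len : Int) (index_head : Int × Int) (index_tail : Int × Int) (triple_tokenize : List Int) : List Int :=
  let l0 := List.replicate max_len.toNat 0
  let l1 := if index_head.1 < max_len then pySetAt l0 index_head.1 1 else l0
  let l2 := (PySem.List.pyRange (index_head.1 + 1) index_head.2 1).foldl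
      (fun acc i => if i < max_len then pySetAt acc i 2 else acc) l1
  let l3 := if index_tail.1 < max_len then pySetAt l2 index_tail.1 3 else l2
  (PySem.List.pyRange (index_tail.1 + 1) index_tail.2 1).foldl
      (fun acc i => if i < max_len then pySetAt acc i 4 else acc) l3

-- ===== PORT B =====
def pvLabel (index_head : Int × Int) (index_tail : Int × Int) (i : Int) : Int :=
  if i = index_tail.1 then 3
  else if index_tail.1 < i ∧ i < index_tail.2 then 4
  else if i = index_head.1 then 1
  else if index_head.1 < i ∧ i < index_head.2 then 2
  else 0

def get_entity_label_alt (max_len : Int) (index_head : Int × Int) (index_tail : Int × Int) (triple_tokenize : List Int) : List Int :=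
  (PySem.List.pyRange 0 max_len 1).map (pvLabel index_head index_tail)

-- ===== PRECONDITION & SPEC =====
-- Pre_ restricts to nonnegative span-start indices (the natural domain: spans are token
-- positions); on negative starts A either raises IndexError or writes via Python's
-- negative-index wraparound from the end of the list.
def Pre_get_entity_label (max_len : Int) (index_head : Int × Int) (index_tail : Int × Int) (triple_tokenize : List Int) : Prop :=
  0 ≤ index_head.1 ∧ 0 ≤ index_tail.1
instance (max_len : Int) (index_head : Int × Int) (index_tail : Int × Int) (triple_tokenize : List Int) : Decidable (Pre_get_entity_label max_len index_head index_tail triple_tokenize) := by unfold Pre_get_entity_label; infer_instance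

def pvWitness_get_entity_label : Int × (Int × Int) × (Int × Int) × List Int := (6, (1, 3), (4, 6), [7, 8])

def Spec_get_entity_label (max_len : Int) (index_head : Int × Int) (index_tail : Int × Int) (triple_tokenize : List Int) (out : List Int) : Prop := out = get_entity_label_alt max_len index_head index_tail triple_tokenize
instance (max_len : Int) (index_head : Int × Int) (index_tail : Int × Int) (triple_tokenize : List Int) (out : List Int) : Decidable (Spec_get_entity_label max_len index_head index_tail triple_tokenize out) := by unfold Spec_get_entity_label; infer_instance

-- ===== CLAIM (what is proved, stated in full; the proofs are below) =====
def Claim_equal_get_entity_label : Prop := ∀ (max_len : Int) (index_head : Int × Int) (index_tail : Int × Int) (triple_tokenize : List Int), Dom_get_entity_label max_len index_head index_tail triple_tokenize → Pre_get_entity_label max_len index_head index_tail triple_tokenize → Spec_get_entity_label max_len index_head index_tail triple_tokenize (get_entity_label max_len index_head index_tail triple_tokenize)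

-- ===== LEMMAS AND PROOFS =====

theorem pySetAt_nonneg (xs : List Int) (i : Int) (v : Int) (h : 0 ≤ i) :
    pySetAt xs i v = xs.set i.toNat v := by
  simp [pySetAt, h]

theorem foldl_set_length (m v : Int) (l : List Int) (xs : List Int) :
    (l.foldl (fun acc i => if i < m then pySetAt acc i v else acc) xs).length = xs.length := by
  induction l generalizing xs with
  | nil => rfl
  | cons a l ih =>
    simp only [List.foldl_cons]
    rw [ih]
    split_ifs <;> simp [pySetAt] <;> split_ifs <;> simp

-- getElem? after a fold of conditional writes of the constant v at nonnegative indices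
theorem foldl_set_getElem? (m v : Int) (l : List Int) (xs : List Int) (j : Nat)
    (h : ∀ i ∈ l, 0 ≤ i) :
    (l.foldl (fun acc i => if i < m then pySetAt acc i v else acc) xs)[j]? =
      if (j : Int) ∈ l ∧ (j : Int) < m then xs[j]?.map (fun _ => v) else xs[j]? := by
  induction l generalizing xs with
  | nil => simp
  | cons a l ih =>
    have ha : 0 ≤ a := h a (by simp)
    have h' : ∀ i ∈ l, 0 ≤ i := fun i hi => h i (by simp [hi])
    simp only [List.foldl_cons]
    rw [ih _ h']
    by_cases ham : a < m
    · simp only [if_pos ham, pySetAt_nonneg _ _ _ ha]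
      by_cases hj : j < xs.length
      · by_cases haj : (j : Int) = a
        · have h1 : a.toNat = j := by omega
          rw [List.getElem?_set, if_pos h1, if_pos (show a.toNat < xs.length by omega),
            List.getElem?_eq_getElem hj]
          simp [haj, ham]
        · have h1 : ¬ a.toNat = j := by omega
          rw [List.getElem?_set, if_neg h1]
          simp only [List.mem_cons]
          by_cases hmem : (j : Int) ∈ l ∧ (j : Int) < m
          · rw [if_pos hmem, if_pos ⟨Or.inr hmem.1, hmem.2⟩]
          · rw [if_neg hmem, if_neg]
            rintro ⟨hc1, hc2⟩
            exact hmem ⟨hc1.resolve_left haj, hc2⟩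
      · have hx : xs[j]? = none := by
          rw [List.getElem?_eq_none_iff]; omega
        have hx' : (xs.set a.toNat v)[j]? = none := by
          rw [List.getElem?_eq_none_iff, List.length_set]; omega
        simp [hx, hx']
    · simp only [if_neg ham, List.mem_cons]
      by_cases hmem : (j : Int) ∈ l ∧ (j : Int) < m
      · rw [if_pos hmem, if_pos ⟨Or.inr hmem.1, hmem.2⟩]
      · rw [if_neg hmem, if_neg]
        rintro ⟨hc1, hc2⟩
        rcases hc1 with hc1 | hc1
        · omega
        · exact hmem ⟨hc1, hc2⟩

-- A's result, element by element
theorem get_entity_label_getElem? (max_len : Int) (ihd itl : Int × Int) (tt : List Int)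
    (hh : 0 ≤ ihd.1) (ht : 0 ≤ itl.1) (j : Nat) :
    (get_entity_label max_len ihd itl tt)[j]? =
      if (j : Int) < max_len then
        some (if itl.1 + 1 ≤ (j : Int) ∧ (j : Int) < itl.2 then 4
          else if (j : Int) = itl.1 then 3
          else if ihd.1 + 1 ≤ (j : Int) ∧ (j : Int) < ihd.2 then 2
          else if (j : Int) = ihd.1 then 1 else 0)
      else none := by
  have hmem1 : ∀ i ∈ PySem.List.pyRange (ihd.1 + 1) ihd.2 1, 0 ≤ i := by
    intro i hi; rw [PySem.List.mem_pyRange_one] at hi; omega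
  have hmem2 : ∀ i ∈ PySem.List.pyRange (itl.1 + 1) itl.2 1, 0 ≤ i := by
    intro i hi; rw [PySem.List.mem_pyRange_one] at hi; omega
  have e0 : ∀ k : Nat, (List.replicate max_len.toNat (0:Int))[k]? =
      if (k : Int) < max_len then some 0 else none := by
    intro k; rw [List.getElem?_replicate]
    split_ifs with h1 h2 <;> first | rfl | omega
  -- layer 1 : write 1 at the head start
  set L1 := (if ihd.1 < max_len then pySetAt (List.replicate max_len.toNat 0) ihd.1 1
      else List.replicate max_len.toNat 0) with hL1
  have len1 : L1.length = max_len.toNat := by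
    rw [hL1]; split_ifs with h1
    · rw [pySetAt_nonneg _ _ _ hh]; simp
    · simp
  have e1 : ∀ k : Nat, L1[k]? =
      if (k : Int) < max_len then some (if (k : Int) = ihd.1 then 1 else 0) else none := by
    intro k; rw [hL1]
    by_cases h1 : ihd.1 < max_len
    · rw [if_pos h1, pySetAt_nonneg _ _ _ hh, List.getElem?_set, List.length_replicate]
      by_cases hk : (k : Int) = ihd.1
      · rw [if_pos (show ihd.1.toNat = k by omega),
          if_pos (show ihd.1.toNat < max_len.toNat by omega),
          if_pos (show (k : Int) < max_len by omega), if_pos hk]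
      · rw [if_neg (by omega), e0]
        by_cases hkm : (k : Int) < max_len
        · rw [if_pos hkm, if_pos hkm, if_neg hk]
        · rw [if_neg hkm, if_neg hkm]
    · rw [if_neg h1, e0]
      by_cases hkm : (k : Int) < max_len
      · rw [if_pos hkm, if_pos hkm, if_neg (show ¬((k : Int) = ihd.1) by omega)]
      · rw [if_neg hkm, if_neg hkm]
  -- layer 2 : fill 2 over the head interior
  set L2 := (PySem.List.pyRange (ihd.1 + 1) ihd.2 1).foldl
      (fun acc i => if i < max_len then pySetAt acc i 2 else acc) L1 with hL2
  have len2 : L2.length = max_len.toNat := by rw [hL2, foldl_set_length, len1]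
  have e2 : ∀ k : Nat, L2[k]? =
      if (k : Int) < max_len then
        some (if ihd.1 + 1 ≤ (k : Int) ∧ (k : Int) < ihd.2 then 2
          else if (k : Int) = ihd.1 then 1 else 0) else none := by
    intro k
    rw [hL2, foldl_set_getElem? _ _ _ _ _ hmem1, e1]
    simp only [PySem.List.mem_pyRange_one]
    by_cases hkm : (k : Int) < max_len
    · by_cases hint : ihd.1 + 1 ≤ (k : Int) ∧ (k : Int) < ihd.2
      · rw [if_pos ⟨hint, hkm⟩, if_pos hkm, if_pos hkm, if_pos hint]; rfl
      · rw [if_neg (fun h => hint h.1), if_pos hkm, if_pos hkm, if_neg hint]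
    · rw [if_neg (fun h => hkm h.2), if_neg hkm, if_neg hkm]
  -- layer 3 : write 3 at the tail start
  set L3 := (if itl.1 < max_len then pySetAt L2 itl.1 3 else L2) with hL3
  have len3 : L3.length = max_len.toNat := by
    rw [hL3]; split_ifs with h1
    · rw [pySetAt_nonneg _ _ _ ht]; simp [len2]
    · exact len2
  have e3 : ∀ k : Nat, L3[k]? =
      if (k : Int) < max_len then
        some (if (k : Int) = itl.1 then 3
          else if ihd.1 + 1 ≤ (k : Int) ∧ (k : Int) < ihd.2 then 2
          else if (k : Int) = ihd.1 then 1 else 0) else none := by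
    intro k; rw [hL3]
    by_cases h1 : itl.1 < max_len
    · rw [if_pos h1, pySetAt_nonneg _ _ _ ht, List.getElem?_set, len2]
      by_cases hk : (k : Int) = itl.1
      · rw [if_pos (show itl.1.toNat = k by omega),
          if_pos (show itl.1.toNat < max_len.toNat by omega),
          if_pos (show (k : Int) < max_len by omega), if_pos hk]
      · rw [if_neg (by omega), e2]
        by_cases hkm : (k : Int) < max_len
        · rw [if_pos hkm, if_pos hkm, if_neg hk]
        · rw [if_neg hkm, if_neg hkm]
    · rw [if_neg h1, e2]
      by_cases hkm : (k : Int) < max_len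
      · rw [if_pos hkm, if_pos hkm, if_neg (show ¬((k : Int) = itl.1) by omega)]
      · rw [if_neg hkm, if_neg hkm]
  -- layer 4 : fill 4 over the tail interior
  show ((PySem.List.pyRange (itl.1 + 1) itl.2 1).foldl
      (fun acc i => if i < max_len then pySetAt acc i 4 else acc) L3)[j]? = _
  rw [foldl_set_getElem? _ _ _ _ _ hmem2, e3]
  simp only [PySem.List.mem_pyRange_one]
  by_cases hjm : (j : Int) < max_len
  · by_cases hint : itl.1 + 1 ≤ (j : Int) ∧ (j : Int) < itl.2
    · rw [if_pos ⟨hint, hjm⟩, if_pos hjm, if_pos hjm, if_pos hint]; rfl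
    · rw [if_neg (fun h => hint h.1), if_pos hjm, if_pos hjm, if_neg hint]
  · rw [if_neg (fun h => hjm h.2), if_neg hjm, if_neg hjm]

-- B's result, element by element
theorem get_entity_label_alt_getElem? (max_len : Int) (ihd itl : Int × Int) (tt : List Int)
    (j : Nat) :
    (get_entity_label_alt max_len ihd itl tt)[j]? =
      if (j : Int) < max_len then some (pvLabel ihd itl (j : Int)) else none := by
  unfold get_entity_label_alt
  by_cases hm : 0 ≤ max_len
  · have : max_len = (max_len.toNat : Int) := by omega
    rw [this, PySem.List.pyRange_zero_natCast, List.map_map]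
    by_cases hj : j < max_len.toNat
    · have hsome : (List.range max_len.toNat)[j]? = some j := by
        rw [List.getElem?_eq_getElem (by simpa using hj)]
        simp
      rw [List.getElem?_map, hsome,
        if_pos (show ((j : Nat) : Int) < ((max_len.toNat : Nat) : Int) by omega)]
      rfl
    · have hnone : (List.range max_len.toNat)[j]? = none := by
        rw [List.getElem?_eq_none_iff, List.length_range]
        omega
      rw [List.getElem?_map, hnone, if_neg (by omega)]
      rfl
  · have hnil : PySem.List.pyRange 0 max_len 1 = [] := by
      rw [List.eq_nil_iff_forall_not_mem]
      intro x hx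
      rw [PySem.List.mem_pyRange_one] at hx
      omega
    rw [hnil, if_neg (by omega)]
    simp

-- ===== VERDICT (by name: the statement is the Claim_ definition above) =====
theorem get_entity_label_spec : Claim_equal_get_entity_label := by
  intro max_len ihd itl tt _ hpre
  unfold Spec_get_entity_label
  apply List.ext_getElem?
  intro j
  rw [get_entity_label_getElem? max_len ihd itl tt hpre.1 hpre.2 j,
    get_entity_label_alt_getElem? max_len ihd itl tt j]
  by_cases h1 : (j : Int) < max_len
  · rw [if_pos h1, if_pos h1]
    congr 1
    unfold pvLabel
    split_ifs <;> first | rfl | omega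
  · rw [if_neg h1, if_neg h1]
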